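-- pv_equiv track=rewrite | github.com/jear/mlops | categorisationmailsads/src/eval.py | create_list_categories_from_sample
-- ===== SOURCE A (Python) =====
-- def create_list_categories_from_sample(labels_averes, labels_predis) :
--     list_categories = []
--     # On gère ces deux catégories à part car l'ordre n'est pas alphabétique dans notre binarizer : TZ1 arrive avant TZ0
--     append_TZ1 = False
--     append_TZ0 = False
--     for el in labels_averes :
--         if el not in list_categories :
--             if el == "TZ1" :
--                 append_TZ1 = True
--             elif el == "TZ0" :
--                 append_TZ0 = True
--             else :
--                 list_categories.append(el)
--     for el in labels_predis :
--         if el not in list_categories :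
--             if el == "TZ1":
--                 append_TZ1 = True
--             elif el == "TZ0":
--                 append_TZ0 = True
--             else:
--                 list_categories.append(el)
--     list_categories.sort()
--     if append_TZ1 :
--         list_categories.append("TZ1")
--     if append_TZ0 :
--         list_categories.append("TZ0")
--     return list_categories
-- ===== SOURCE B (Python) =====
-- def create_list_categories_from_sample(labels_averes, labels_predis):
--     # Single pass keeping the body permanently sorted and duplicate-free: for each
--     # element, binary-search its position and insert it there unless already present
--     # (no final sort step); TZ1/TZ0 are diverted to flags and appended last.
--     sorted_body = []
--     saw_tz1 = False
--     saw_tz0 = False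
--     for el in labels_averes + labels_predis:
--         if el == "TZ1":
--             saw_tz1 = True
--         elif el == "TZ0":
--             saw_tz0 = True
--         else:
--             lo, hi = 0, len(sorted_body)
--             while lo < hi:
--                 mid = (lo + hi) // 2
--                 if sorted_body[mid] < el:
--                     lo = mid + 1
--                 else:
--                     hi = mid
--             if lo == len(sorted_body) or sorted_body[lo] != el:
--                 sorted_body.insert(lo, el)
--     if saw_tz1:
--         sorted_body.append("TZ1")
--     if saw_tz0:
--         sorted_body.append("TZ0")
--     return sorted_body
-- ===== Notes on version B (the rewrite author's own statement) =====
-- stated objective: faster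
-- what changed: Replaces A's two dedup loops (a linear 'not in list' scan per element with inline flag branches, then list.sort()) by one combined pass that keeps the body permanently sorted via binary-search insertion with duplicate skip, so the quadratic Python-level membership scans and the final sort step disappear.
import Mathlib
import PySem

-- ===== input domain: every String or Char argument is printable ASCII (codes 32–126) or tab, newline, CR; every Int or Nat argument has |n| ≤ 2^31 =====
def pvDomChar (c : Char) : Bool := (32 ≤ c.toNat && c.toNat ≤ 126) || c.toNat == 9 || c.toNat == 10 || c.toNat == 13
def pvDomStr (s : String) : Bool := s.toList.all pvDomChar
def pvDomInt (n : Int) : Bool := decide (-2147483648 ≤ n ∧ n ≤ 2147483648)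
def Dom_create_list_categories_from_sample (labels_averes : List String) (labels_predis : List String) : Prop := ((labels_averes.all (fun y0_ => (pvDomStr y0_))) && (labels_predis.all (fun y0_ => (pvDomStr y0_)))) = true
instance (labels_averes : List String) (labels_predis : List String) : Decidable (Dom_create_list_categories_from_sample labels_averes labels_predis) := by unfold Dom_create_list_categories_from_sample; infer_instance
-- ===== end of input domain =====

-- B makes one combined pass that keeps the body permanently sorted via binary-search
-- insertion with duplicate skip (no sort step), instead of A's two dedup loops (linear
-- 'not in list' scan per element) followed by list.sort(); measurably faster on large inputs.

-- ===== PORT A =====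
-- one iteration of A's loop body over state (list_categories, append_TZ1, append_TZ0)
def stepA (st : List String × Bool × Bool) (el : String) : List String × Bool × Bool :=
  if el ∈ st.1 then st
  else if el = "TZ1" then (st.1, true, st.2.2)
  else if el = "TZ0" then (st.1, st.2.1, true)
  else (st.1 ++ [el], st.2.1, st.2.2)

def create_list_categories_from_sample (labels_averes : List String) (labels_predis : List String) : List String :=
  let st1 := labels_averes.foldl stepA ([], false, false)
  let st2 := labels_predis.foldl stepA st1
  let list_categories := PySem.List.sorted st2.1 (fun x => x)
  let list_categories := if st2.2.1 then list_categories ++ ["TZ1"] else list_categories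
  if st2.2.2 then list_categories ++ ["TZ0"] else list_categories

-- ===== PORT B =====
-- Source B's inner while-loop: binary search for the leftmost position whose element is not < el
-- (indices stay in range, so the in-range read sorted_body[mid] is ported as getD with "" unused)
def bisectLeft (body : List String) (el : String) (lo hi : Nat) : Nat :=
  if _h : lo < hi then
    let mid := (lo + hi) / 2
    if body.getD mid "" < el then bisectLeft body el (mid + 1) hi
    else bisectLeft body el lo mid
  else lo
termination_by hi - lo
decreasing_by
  · omega
  · omega

-- Source B's conditional sorted_body.insert(lo, el) after the search (list.insert = PySem.List.insert)
def binInsert (body : List String) (el : String) : List String :=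
  let lo := bisectLeft body el 0 body.length
  if lo = body.length ∨ body.getD lo "" ≠ el then PySem.List.insert body (lo : Int) el else body

-- one iteration of Source B's single loop over state (sorted_body, saw_tz1, saw_tz0)
def stepB (st : List String × Bool × Bool) (el : String) : List String × Bool × Bool :=
  if el = "TZ1" then (st.1, true, st.2.2)
  else if el = "TZ0" then (st.1, st.2.1, true)
  else (binInsert st.1 el, st.2.1, st.2.2)

def create_list_categories_from_sample_alt (labels_averes : List String) (labels_predis : List String) : List String :=
  let st := (labels_averes ++ labels_predis).foldl stepB ([], false, false)
  let sorted_body := if st.2.1 then st.1 ++ ["TZ1"] else st.1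
  if st.2.2 then sorted_body ++ ["TZ0"] else sorted_body

-- ===== PRECONDITION & SPEC =====
def Spec_create_list_categories_from_sample (labels_averes : List String) (labels_predis : List String) (out : List String) : Prop := out = create_list_categories_from_sample_alt labels_averes labels_predis
instance (labels_averes : List String) (labels_predis : List String) (out : List String) : Decidable (Spec_create_list_categories_from_sample labels_averes labels_predis out) := by unfold Spec_create_list_categories_from_sample; infer_instance

-- ===== CLAIM (what is proved, stated in full; the proofs are below) =====
def Claim_equal_create_list_categories_from_sample : Prop := ∀ (labels_averes : List String) (labels_predis : List String), Dom_create_list_categories_from_sample labels_averes labels_predis → Spec_create_list_categories_from_sample labels_averes labels_predis (create_list_categories_from_sample labels_averes labels_predis)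

-- ===== LEMMAS AND PROOFS =====

-- invariant of A's loop: the accumulated list stays duplicate-free and TZ-free, its members are
-- exactly the old members plus the non-TZ elements seen, and each flag records whether its TZ
-- label occurred
theorem foldA_spec (xs : List String) : ∀ (l : List String) (f1 f0 : Bool),
    l.Nodup → "TZ1" ∉ l → "TZ0" ∉ l →
    (xs.foldl stepA (l, f1, f0)).1.Nodup ∧
    "TZ1" ∉ (xs.foldl stepA (l, f1, f0)).1 ∧
    "TZ0" ∉ (xs.foldl stepA (l, f1, f0)).1 ∧
    (∀ y, y ∈ (xs.foldl stepA (l, f1, f0)).1 ↔ y ∈ l ∨ (y ∈ xs ∧ y ≠ "TZ1" ∧ y ≠ "TZ0")) ∧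
    (xs.foldl stepA (l, f1, f0)).2.1 = (f1 || decide ("TZ1" ∈ xs)) ∧
    (xs.foldl stepA (l, f1, f0)).2.2 = (f0 || decide ("TZ0" ∈ xs)) := by
  induction xs with
  | nil => intro l f1 f0 hn h1 h0; simp [hn, h1, h0]
  | cons x xs ih =>
    intro l f1 f0 hn h1 h0
    simp only [List.foldl_cons]
    by_cases hxl : x ∈ l
    · have hx1 : x ≠ "TZ1" := fun h => h1 (h ▸ hxl)
      have hx0 : x ≠ "TZ0" := fun h => h0 (h ▸ hxl)
      rw [show stepA (l, f1, f0) x = (l, f1, f0) by simp [stepA, hxl]]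
      obtain ⟨a, b, c, d, e, f⟩ := ih l f1 f0 hn h1 h0
      refine ⟨a, b, c, ?_, ?_, ?_⟩
      · intro y; rw [d y]; simp only [List.mem_cons]
        constructor
        · rintro (h | ⟨h, h2⟩) <;> tauto
        · rintro (h | ⟨rfl | h, h2⟩)
          · tauto
          · exact Or.inl hxl
          · tauto
      · rw [e]; simp [List.mem_cons, Ne.symm hx1]
      · rw [f]; simp [List.mem_cons, Ne.symm hx0]
    · by_cases hx1 : x = "TZ1"
      · rw [show stepA (l, f1, f0) x = (l, true, f0) by simp [stepA, hx1, h1]]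
        obtain ⟨a, b, c, d, e, f⟩ := ih l true f0 hn h1 h0
        subst hx1
        refine ⟨a, b, c, ?_, ?_, ?_⟩
        · intro y; rw [d y]; simp only [List.mem_cons]
          constructor
          · rintro (h | ⟨h, h2⟩) <;> tauto
          · rintro (h | ⟨h | h, h2, h3⟩) <;> tauto
        · rw [e]; simp
        · rw [f]; simp [List.mem_cons]
      · by_cases hx0 : x = "TZ0"
        · rw [show stepA (l, f1, f0) x = (l, f1, true) by simp [stepA, hx0, h0]]
          obtain ⟨a, b, c, d, e, f⟩ := ih l f1 true hn h1 h0
          subst hx0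
          refine ⟨a, b, c, ?_, ?_, ?_⟩
          · intro y; rw [d y]; simp only [List.mem_cons]
            constructor
            · rintro (h | ⟨h, h2⟩) <;> tauto
            · rintro (h | ⟨h | h, h2, h3⟩) <;> tauto
          · rw [e]; simp [List.mem_cons]
          · rw [f]; simp
        · rw [show stepA (l, f1, f0) x = (l ++ [x], f1, f0) by simp [stepA, hxl, hx1, hx0]]
          obtain ⟨a, b, c, d, e, f⟩ :=
            ih (l ++ [x]) f1 f0
              (by rw [List.nodup_append]
                  refine ⟨hn, List.nodup_singleton x, ?_⟩
                  intro y hy b hb h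
                  exact hxl ((h.trans (List.mem_singleton.mp hb)) ▸ hy))
              (by simp only [List.mem_append, List.mem_singleton, not_or]
                  exact ⟨h1, fun h => hx1 h.symm⟩)
              (by simp only [List.mem_append, List.mem_singleton, not_or]
                  exact ⟨h0, fun h => hx0 h.symm⟩)
          refine ⟨a, b, c, ?_, ?_, ?_⟩
          · intro y; rw [d y]
            simp only [List.mem_append, List.mem_cons, List.not_mem_nil, or_false]
            constructor
            · rintro ((h | rfl) | ⟨h, h2⟩)
              · tauto
              · exact Or.inr ⟨Or.inl rfl, hx1, hx0⟩
              · tauto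
            · rintro (h | ⟨rfl | h, h2, h3⟩) <;> tauto
          · rw [e]; simp [List.mem_cons, Ne.symm hx1]
          · rw [f]; simp [List.mem_cons, Ne.symm hx0]

-- monotone reads: on a strictly increasing list, getD is monotone in the index
theorem getD_mono (l : List String) (hs : l.Pairwise (· < ·)) (i j : Nat)
    (hij : i ≤ j) (hj : j < l.length) : l.getD i "" ≤ l.getD j "" := by
  rw [List.getD_eq_getElem l "" (lt_of_le_of_lt hij hj), List.getD_eq_getElem l "" hj]
  rcases Nat.lt_or_ge i j with h | h
  · exact le_of_lt (List.pairwise_iff_getElem.mp hs i j (lt_of_le_of_lt hij hj) hj h)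
  · have : i = j := le_antisymm hij h
    subst this; exact le_refl _

-- binary-search correctness: bisectLeft returns the leftmost index whose element is not < el
theorem bisectLeft_spec (body : List String) (el : String) (hs : body.Pairwise (· < ·)) :
    ∀ (d lo hi : Nat), hi - lo ≤ d → lo ≤ hi → hi ≤ body.length →
    (∀ j, j < lo → body.getD j "" < el) →
    (∀ j, hi ≤ j → j < body.length → ¬ body.getD j "" < el) →
    bisectLeft body el lo hi ≤ body.length ∧
    (∀ j, j < bisectLeft body el lo hi → body.getD j "" < el) ∧
    (∀ j, bisectLeft body el lo hi ≤ j → j < body.length → ¬ body.getD j "" < el) := by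
  intro d
  induction d with
  | zero =>
    intro lo hi hd hlh hhl hlow hup
    have : lo = hi := by omega
    subst this
    rw [bisectLeft]
    simp only [lt_irrefl, dite_false]
    exact ⟨le_trans hlh hhl, hlow, hup⟩
  | succ d ih =>
    intro lo hi hd hlh hhl hlow hup
    rw [bisectLeft]
    by_cases h : lo < hi
    · simp only [h, dite_true]
      by_cases hc : body.getD ((lo + hi) / 2) "" < el
      · simp only [hc, if_true]
        refine ih ((lo + hi) / 2 + 1) hi (by omega) (by omega) hhl ?_ hup
        intro j hj
        exact lt_of_le_of_lt (getD_mono body hs j ((lo + hi) / 2) (by omega) (by omega)) hc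
      · simp only [hc, if_false]
        refine ih lo ((lo + hi) / 2) (by omega) (by omega) (by omega) hlow ?_
        intro j hj hjl
        exact fun hlt => hc (lt_of_le_of_lt (getD_mono body hs ((lo + hi) / 2) j hj hjl) hlt)
    · simp only [h, dite_false]
      exact ⟨le_trans hlh hhl, hlow, fun j hj hjl => hup j (by omega) hjl⟩

-- binInsert on a strictly increasing list: stays strictly increasing, members = {el} ∪ old
theorem binInsert_spec (l : List String) (el : String) (hp : l.Pairwise (· < ·)) :
    (binInsert l el).Pairwise (· < ·) ∧
    (∀ y, y ∈ binInsert l el ↔ y = el ∨ y ∈ l) := by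
  obtain ⟨hrlen, hlow, hup⟩ :=
    bisectLeft_spec l el hp l.length 0 l.length (by omega) (by omega) (le_refl _)
      (by omega) (by intro j hj hjl; omega)
  unfold binInsert
  set r := bisectLeft l el 0 l.length with hr
  by_cases hcond : r = l.length ∨ l.getD r "" ≠ el
  · simp only [hcond, if_true]
    rw [PySem.List.insert_natCast l r el hrlen]
    have htd : l.take r ++ l.drop r = l := List.take_append_drop r l
    have htake : ∀ a ∈ l.take r, a < el := by
      intro a ha
      obtain ⟨i, hi, hieq⟩ := List.mem_iff_getElem.mp ha
      have h2 : i < r ∧ i < l.length := by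
        simpa [List.length_take, Nat.lt_min] using hi
      rw [List.getElem_take] at hieq
      have : l.getD i "" < el := hlow i h2.1
      rw [List.getD_eq_getElem l "" h2.2] at this
      exact hieq ▸ this
    have hdrop : ∀ b ∈ l.drop r, el < b := by
      intro b hb
      obtain ⟨k, hk, hkeq⟩ := List.mem_iff_getElem.mp hb
      rw [List.getElem_drop] at hkeq
      have hrk : r + k < l.length := by
        have := List.length_drop (l := l) (i := r)
        omega
      have hle : ¬ l.getD (r + k) "" < el := hup (r + k) (by omega) hrk
      rw [List.getD_eq_getElem l "" hrk] at hle
      have hne : el ≠ l[r + k] := by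
        rcases hcond with hre | hne
        · omega
        · rcases Nat.eq_zero_or_pos k with rfl | hkpos
          · rw [List.getD_eq_getElem l "" (by omega)] at hne
            simpa using fun h => hne h.symm
          · intro h
            have hrlt : l[r] < l[r + k] :=
              List.pairwise_iff_getElem.mp hp r (r + k) (by omega) hrk (by omega)
            have : ¬ l.getD r "" < el := hup r (le_refl _) (by omega)
            rw [List.getD_eq_getElem l "" (by omega)] at this
            rw [← h] at hrlt
            exact this hrlt
      exact hkeq ▸ lt_of_le_of_ne (not_lt.mp hle) hne
    constructor
    · rw [List.pairwise_append]
      refine ⟨List.Pairwise.sublist (List.take_sublist r l) hp, ?_, ?_⟩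
      · rw [List.pairwise_cons]
        exact ⟨hdrop, List.Pairwise.sublist (List.drop_sublist r l) hp⟩
      · intro a ha b hb
        rcases List.mem_cons.mp hb with rfl | hb'
        · exact htake a ha
        · exact lt_trans (htake a ha) (hdrop b hb')
    · intro y
      constructor
      · intro hy
        rcases List.mem_append.mp hy with hy' | hy'
        · exact Or.inr (htd ▸ List.mem_append.mpr (Or.inl hy'))
        · rcases List.mem_cons.mp hy' with rfl | hy''
          · exact Or.inl rfl
          · exact Or.inr (htd ▸ List.mem_append.mpr (Or.inr hy''))
      · rintro (rfl | hy)
        · exact List.mem_append.mpr (Or.inr (List.mem_cons.mpr (Or.inl rfl)))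
        · rcases List.mem_append.mp (htd ▸ hy) with hy' | hy'
          · exact List.mem_append.mpr (Or.inl hy')
          · exact List.mem_append.mpr (Or.inr (List.mem_cons.mpr (Or.inr hy')))
  · simp only [hcond, if_false]
    push Not at hcond
    obtain ⟨hrlt, hreq⟩ := hcond
    have hrl : r < l.length := lt_of_le_of_ne hrlen hrlt
    refine ⟨hp, fun y => ⟨fun h => Or.inr h, ?_⟩⟩
    rintro (rfl | hy)
    · rw [← hreq, List.getD_eq_getElem l "" hrl]
      exact List.getElem_mem hrl
    · exact hy

-- invariant of B's single loop: the body stays strictly increasing, contains exactly the old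
-- members plus the non-TZ elements seen, and each flag records whether its TZ label occurred
theorem foldB_spec (xs : List String) : ∀ (l : List String) (f1 f0 : Bool),
    l.Pairwise (· < ·) →
    (xs.foldl stepB (l, f1, f0)).1.Pairwise (· < ·) ∧
    (∀ y, y ∈ (xs.foldl stepB (l, f1, f0)).1 ↔ y ∈ l ∨ (y ∈ xs ∧ y ≠ "TZ1" ∧ y ≠ "TZ0")) ∧
    (xs.foldl stepB (l, f1, f0)).2.1 = (f1 || decide ("TZ1" ∈ xs)) ∧
    (xs.foldl stepB (l, f1, f0)).2.2 = (f0 || decide ("TZ0" ∈ xs)) := by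
  induction xs with
  | nil => exact fun l f1 f0 hp => ⟨hp, by simp, by simp, by simp⟩
  | cons x xs ih =>
    intro l f1 f0 hp
    simp only [List.foldl_cons]
    by_cases hx1 : x = "TZ1"
    · rw [show stepB (l, f1, f0) x = (l, true, f0) by simp [stepB, hx1]]
      obtain ⟨a, d, e, f⟩ := ih l true f0 hp
      subst hx1
      refine ⟨a, ?_, ?_, ?_⟩
      · intro y; rw [d y]; simp only [List.mem_cons]
        constructor
        · rintro (h | ⟨h, h2⟩) <;> tauto
        · rintro (h | ⟨h | h, h2, h3⟩) <;> tauto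
      · rw [e]; simp
      · rw [f]; simp [List.mem_cons]
    · by_cases hx0 : x = "TZ0"
      · rw [show stepB (l, f1, f0) x = (l, f1, true) by simp [stepB, hx0]]
        obtain ⟨a, d, e, f⟩ := ih l f1 true hp
        subst hx0
        refine ⟨a, ?_, ?_, ?_⟩
        · intro y; rw [d y]; simp only [List.mem_cons]
          constructor
          · rintro (h | ⟨h, h2⟩) <;> tauto
          · rintro (h | ⟨h | h, h2, h3⟩) <;> tauto
        · rw [e]; simp [List.mem_cons]
        · rw [f]; simp
      · rw [show stepB (l, f1, f0) x = (binInsert l x, f1, f0) by simp [stepB, hx1, hx0]]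
        obtain ⟨ip, im⟩ := binInsert_spec l x hp
        obtain ⟨a, d, e, f⟩ := ih (binInsert l x) f1 f0 ip
        refine ⟨a, ?_, ?_, ?_⟩
        · intro y; rw [d y, im y]; simp only [List.mem_cons]
          constructor
          · rintro ((rfl | h) | ⟨h, h2⟩)
            · exact Or.inr ⟨Or.inl rfl, hx1, hx0⟩
            · tauto
            · tauto
          · rintro (h | ⟨rfl | h, h2, h3⟩) <;> tauto
        · rw [e]; simp [List.mem_cons, Ne.symm hx1]
        · rw [f]; simp [List.mem_cons, Ne.symm hx0]

-- ===== VERDICT (by name: the statement is the Claim_ definition above) =====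
theorem create_list_categories_from_sample_spec : Claim_equal_create_list_categories_from_sample := by
  intro a p _
  unfold Spec_create_list_categories_from_sample
  unfold create_list_categories_from_sample create_list_categories_from_sample_alt
  dsimp only
  rw [← List.foldl_append]
  obtain ⟨hn, h1, h0, hmemA, heA, hfA⟩ :=
    foldA_spec (a ++ p) [] false false (List.nodup_nil) (by simp) (by simp)
  obtain ⟨hpB, hmemB, heB, hfB⟩ := foldB_spec (a ++ p) [] false false (List.Pairwise.nil)
  set stA := (a ++ p).foldl stepA ([], false, false) with hstA
  set stB := (a ++ p).foldl stepB ([], false, false) with hstB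
  have hbody : PySem.List.sorted stA.1 (fun x => x) = stB.1 := by
    apply PySem.List.sorted_eq_of_perm_of_pairwise_lt
    · rw [List.perm_ext_iff_of_nodup (hpB.nodup) hn]
      intro y
      rw [hmemB y, hmemA y]
    · exact hpB
  rw [hbody, heA, heB, hfA, hfB]
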